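-- pv_equiv track=rewrite | github.com/mohammadfaiizan/ProjectI | DSA/Problem/Queue_Stack/09_Competitive_Programming_Patterns/2289_Steps_to_Make_Array_Non_decreasing.py | totalSteps_recursive
-- ===== SOURCE A (Python) =====
-- from typing import List
--
-- def totalSteps_recursive(nums: List[int]) -> int:
--     """
--     Approach 4: Recursive Solution
--
--     Use recursion to simulate the removal process.
--
--     Time: O(n²), Space: O(n) due to recursion
--     """
--     def simulate(arr: List[int]) -> int:
--         if len(arr) <= 1:
--             return 0
--
--         to_remove = []
--         for i in range(1, len(arr)):
--             if arr[i - 1] > arr[i]: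
--                 to_remove.append(i)
--
--         if not to_remove:
--             return 0
--
--         # Create new array without removed elements
--         new_arr = []
--         remove_set = set(to_remove)
--
--         for i in range(len(arr)):
--             if i not in remove_set:
--                 new_arr.append(arr[i])
--
--         return 1 + simulate(new_arr)
--
--     return simulate(nums)
-- ===== SOURCE B (Python) =====
-- from typing import List
--
-- def totalSteps_recursive(nums: List[int]) -> int:
--     # Iterative round simulation: one zip pass per round, no index sets.
--     arr = list(nums)
--     steps = 0
--     while arr:
--         head, tail = arr[0], arr[1:]
--         kept = [c for p, c in zip(arr, tail) if p <= c]
--         if len(kept) == len(tail):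
--             return steps
--         arr = [head] + kept
--         steps += 1
--     return steps
-- ===== Notes on version B (the rewrite author's own statement) =====
-- stated objective: simpler
-- what changed: A recursively rebuilds each round with three index passes (collect removal indices, build a set, filter indices through the set); B is an iterative loop doing one zip-adjacent-pairs filter pass per round with no index arithmetic and no set.
import Mathlib
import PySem

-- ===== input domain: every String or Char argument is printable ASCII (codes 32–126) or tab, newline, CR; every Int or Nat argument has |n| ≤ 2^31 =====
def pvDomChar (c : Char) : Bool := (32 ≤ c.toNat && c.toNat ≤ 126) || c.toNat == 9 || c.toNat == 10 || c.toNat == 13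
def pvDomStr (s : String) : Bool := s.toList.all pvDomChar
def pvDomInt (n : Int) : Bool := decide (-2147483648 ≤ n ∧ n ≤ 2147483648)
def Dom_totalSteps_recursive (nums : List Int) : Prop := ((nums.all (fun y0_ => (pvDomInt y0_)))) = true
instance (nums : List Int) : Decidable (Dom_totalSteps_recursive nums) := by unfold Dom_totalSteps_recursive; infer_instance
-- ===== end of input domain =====

-- B replaces A's recursive three-pass round (removal-index list + set + index filter) by an
-- iterative single zip/filter pass per round — a simpler decomposition computing the same value.

-- ===== PORT A =====
-- 'simulate' from A; the fuel argument only makes the recursion total (nums.length + 1 always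
-- suffices, since each recursive call is on a strictly shorter array); all indices are in range,
-- so pyGetD with default 0 is exact.
def pvSimulate (fuel : Nat) (arr : List Int) : Int :=
  match fuel with
  | 0 => 0
  | f + 1 =>
    if arr.length ≤ 1 then 0
    else
      let to_remove := (PySem.List.pyRange 1 (arr.length : Int) 1).foldl
        (fun acc i => if PySem.List.pyGetD arr (i - 1) 0 > PySem.List.pyGetD arr i 0 then acc ++ [i] else acc) []
      if to_remove = [] then 0
      else
        let remove_set : PySem.Set Int := PySem.Set.ofList to_remove
        let new_arr := (PySem.List.pyRange 0 (arr.length : Int) 1).foldl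
          (fun acc i => if !(PySem.Set.contains remove_set i) then acc ++ [PySem.List.pyGetD arr i 0] else acc) []
        1 + pvSimulate f new_arr

def totalSteps_recursive (nums : List Int) : Int := pvSimulate (nums.length + 1) nums

-- ===== PORT B =====
-- the kept-elements comprehension '[c for p, c in zip(arr, tail) if p <= c]' of Source B
def pvKeptFn (head : Int) (tail : List Int) : List Int :=
  (List.zip (head :: tail) tail).filterMap (fun pc => if pc.1 ≤ pc.2 then some pc.2 else none)

-- used by pvAltLoop's termination proof
lemma pvKeptFn_length_le (head : Int) (tail : List Int) : (pvKeptFn head tail).length ≤ tail.length := by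
  have h1 := List.length_filterMap_le (fun pc : Int × Int => if pc.1 ≤ pc.2 then some pc.2 else none)
    ((head :: tail).zip tail)
  simpa [pvKeptFn, List.length_zip] using h1

-- the while loop of Source B: one zip/filter pass per round
def pvAltLoop (arr : List Int) (steps : Int) : Int :=
  match arr with
  | [] => steps
  | head :: tail =>
    if hne : (pvKeptFn head tail).length = tail.length then steps
    else pvAltLoop (head :: pvKeptFn head tail) (steps + 1)
termination_by arr.length
decreasing_by
  have hle : (pvKeptFn head tail).length ≤ tail.length := pvKeptFn_length_le head tail
  simp only [List.length_cons]
  omega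

def totalSteps_recursive_alt (nums : List Int) : Int := pvAltLoop nums 0

-- ===== PRECONDITION & SPEC =====
def Spec_totalSteps_recursive (nums : List Int) (out : Int) : Prop := out = totalSteps_recursive_alt nums
instance (nums : List Int) (out : Int) : Decidable (Spec_totalSteps_recursive nums out) := by unfold Spec_totalSteps_recursive; infer_instance

-- ===== CLAIM (what is proved, stated in full; the proofs are below) =====
def Claim_equal_totalSteps_recursive : Prop := ∀ (nums : List Int), Dom_totalSteps_recursive nums → Spec_totalSteps_recursive nums (totalSteps_recursive nums)

-- ===== LEMMAS AND PROOFS =====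

-- survivors (other than the head) of one removal round on prev :: t
def pvG (prev : Int) (t : List Int) : List Int :=
  match t with
  | [] => []
  | c :: t' => if prev ≤ c then c :: pvG c t' else pvG c t'

lemma pvG_sublist : ∀ (t : List Int) (prev : Int), (pvG prev t).Sublist t := by
  intro t
  induction t with
  | nil => intro prev; simp [pvG]
  | cons c t' ih =>
    intro prev
    simp only [pvG]
    split
    · exact List.Sublist.cons₂ c (ih c)
    · exact List.Sublist.cons c (ih c)

lemma pvG_len_eq_iff (t : List Int) (prev : Int) :
    (pvG prev t).length = t.length ↔ pvG prev t = t := by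
  constructor
  · intro h; exact (pvG_sublist t prev).eq_of_length h
  · intro h; rw [h]

-- B's per-round zip/filter pass computes pvG
lemma pvKeptFn_eq : ∀ (t : List Int) (h : Int), pvKeptFn h t = pvG h t := by
  intro t
  induction t with
  | nil => intro h; rfl
  | cons c t' ih =>
    intro h
    simp only [pvKeptFn, List.zip_cons_cons, List.filterMap_cons, pvG]
    by_cases hc : h ≤ c
    · simp only [hc, if_true]
      exact congrArg _ (ih c)
    · simp only [hc, if_false]
      exact ih c

-- index form of one round, over the tail t of arr = h :: t
lemma pvCore : ∀ (t : List Int) (h : Int),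
    ((List.range t.length).filter (fun k => decide ((h :: t).getD k 0 ≤ t.getD k 0))).map
      (fun k => t.getD k 0) = pvG h t := by
  intro t
  induction t with
  | nil => intro h; rfl
  | cons c t' ih =>
    intro h
    rw [List.length_cons, List.range_succ_eq_map, List.filter_cons]
    by_cases hc : h ≤ c
    · rw [if_pos (by simpa using hc)]
      rw [List.map_cons]
      simp only [List.getD_cons_zero]
      rw [List.filter_map, List.map_map]
      simp only [Function.comp_def]
      rw [List.filter_congr (fun k _ => by
        simp only [List.getD_cons_succ] : ∀ k ∈ List.range t'.length,
          (decide ((h :: c :: t').getD (Nat.succ k) 0 ≤ (c :: t').getD (Nat.succ k) 0))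
          = (decide ((c :: t').getD k 0 ≤ t'.getD k 0)))]
      rw [show (fun k : Nat => (c :: t').getD (Nat.succ k) 0) = (fun k : Nat => t'.getD k 0) from
        funext (fun k => by simp only [List.getD_cons_succ])]
      rw [ih c]
      simp [pvG, hc]
    · rw [if_neg (by simpa using hc)]
      rw [List.filter_map, List.map_map]
      simp only [Function.comp_def]
      rw [List.filter_congr (fun k _ => by
        simp only [List.getD_cons_succ] : ∀ k ∈ List.range t'.length,
          (decide ((h :: c :: t').getD (Nat.succ k) 0 ≤ (c :: t').getD (Nat.succ k) 0))
          = (decide ((c :: t').getD k 0 ≤ t'.getD k 0)))]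
      rw [show (fun k : Nat => (c :: t').getD (Nat.succ k) 0) = (fun k : Nat => t'.getD k 0) from
        funext (fun k => by simp only [List.getD_cons_succ])]
      rw [ih c]
      simp [pvG, hc]

lemma pvG_eq_self_iff : ∀ (t : List Int) (h : Int),
    pvG h t = t ↔ ∀ k, k < t.length → (h :: t).getD k 0 ≤ t.getD k 0 := by
  intro t
  induction t with
  | nil => intro h; simp [pvG]
  | cons c t' ih =>
    intro h
    simp only [pvG]
    by_cases hc : h ≤ c
    · simp only [hc, if_true]
      constructor
      · intro he k hk
        have ht' : pvG c t' = t' := (List.cons.inj he).2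
        match k with
        | 0 => simpa using hc
        | k + 1 =>
          have := (ih c).mp ht' k (by simpa using hk)
          simpa using this
      · intro hall
        have : pvG c t' = t' := by
          apply (ih c).mpr
          intro k hk
          have := hall (k + 1) (by simpa using hk)
          simpa using this
        rw [this]
    · simp only [hc, if_false]
      constructor
      · intro he
        have h1 : (pvG c t').length ≤ t'.length := (pvG_sublist t' c).length_le
        have h2 : (pvG c t').length = t'.length + 1 := by rw [he]; simp
        omega
      · intro hall
        exact absurd (by simpa using hall 0 (by simp)) hc

-- A's round on arr = h :: t: the removal-index list, as a filtered range
lemma pvToRemove (h : Int) (t : List Int) :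
    ((PySem.List.pyRange 1 ((h :: t).length : Int) 1).foldl
      (fun acc i => if PySem.List.pyGetD (h :: t) (i - 1) 0 > PySem.List.pyGetD (h :: t) i 0 then acc ++ [i] else acc) [])
    = ((List.range t.length).filter (fun k => decide (t.getD k 0 < (h :: t).getD k 0))).map
        (fun k : Nat => 1 + (k : Int)) := by
  rw [PySem.List.foldl_append_ite_eq_filter, List.nil_append, PySem.List.pyRange_one]
  have hn : (((h :: t).length : Int) - 1).toNat = t.length := by simp
  rw [hn, List.filter_map]
  simp only [Function.comp_def]
  congr 1
  apply List.filter_congr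
  intro k _
  have e1 : (1 : Int) + (k : Int) - 1 = ((k : Nat) : Int) := by ring
  have e2 : (1 : Int) + (k : Int) = ((k + 1 : Nat) : Int) := by push_cast; ring
  rw [e1, e2, PySem.List.pyGetD_natCast, PySem.List.pyGetD_natCast]
  simp [gt_iff_lt]

-- A's round on arr = h :: t: new_arr = h :: pvG h t
lemma pvNewArr (h : Int) (t : List Int) :
    ((PySem.List.pyRange 0 ((h :: t).length : Int) 1).foldl
      (fun acc i => if !(PySem.Set.contains (PySem.Set.ofList
          (((List.range t.length).filter (fun k => decide (t.getD k 0 < (h :: t).getD k 0))).map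
            (fun k : Nat => 1 + (k : Int)))) i) then acc ++ [PySem.List.pyGetD (h :: t) i 0] else acc) [])
    = h :: pvG h t := by
  rw [PySem.List.foldl_append_if, List.nil_append, PySem.List.pyRange_one]
  have hn : (((h :: t).length : Int) - 0).toNat = t.length + 1 := by simp
  rw [hn, List.filter_map, List.map_map]
  simp only [Function.comp_def]
  set S : PySem.Set Int := PySem.Set.ofList
      (((List.range t.length).filter (fun k => decide (t.getD k 0 < (h :: t).getD k 0))).map
        (fun k : Nat => 1 + (k : Int))) with hS
  have hmem : ∀ x : Int, x ∈ S ↔ ∃ j, j < t.length ∧ t.getD j 0 < (h :: t).getD j 0 ∧ x = 1 + (j : Int) := by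
    intro x
    rw [hS, PySem.Set.mem_ofList]
    simp only [List.mem_map, List.mem_filter, List.mem_range, decide_eq_true_eq]
    constructor
    · rintro ⟨j, ⟨hj, hd⟩, hx⟩; exact ⟨j, hj, hd, hx.symm⟩
    · rintro ⟨j, hj, hd, hx⟩; exact ⟨j, ⟨hj, hd⟩, hx.symm⟩
  have hpred : ∀ k ∈ List.range (t.length + 1),
      (!(PySem.Set.contains S ((0 : Int) + (k : Int)))) =
      ((decide (k = 0)) || decide ((h :: t).getD (k - 1) 0 ≤ t.getD (k - 1) 0)) := by
    intro k hkmem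
    have hklt : k < t.length + 1 := List.mem_range.mp hkmem
    have e0 : (0 : Int) + (k : Int) = (k : Int) := by ring
    rw [e0]
    match k with
    | 0 =>
      have hnm : ((0 : Nat) : Int) ∉ S := by
        intro hc
        rcases (hmem _).mp hc with ⟨j, _, _, hx⟩
        push_cast at hx
        omega
      have hf : PySem.Set.contains S ((0 : Nat) : Int) = false := by
        cases hcb : PySem.Set.contains S ((0 : Nat) : Int)
        · rfl
        · exact absurd ((PySem.Set.contains_iff S _).mp hcb) hnm
      rw [hf]
      simp
    | k + 1 =>
      have hk : k < t.length := by omega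
      by_cases hd : t.getD k 0 < (h :: t).getD k 0
      · have hc : ((k + 1 : Nat) : Int) ∈ S := (hmem _).mpr ⟨k, hk, hd, by push_cast; ring⟩
        have htr : PySem.Set.contains S ((k + 1 : Nat) : Int) = true := (PySem.Set.contains_iff S _).mpr hc
        have hd' : t[k]?.getD 0 < (h :: t)[k]?.getD 0 := by simpa using hd
        rw [htr]
        simp [not_le.mpr hd']
      · have hnm : ((k + 1 : Nat) : Int) ∉ S := by
          intro hc
          rcases (hmem _).mp hc with ⟨j, hj, hdj, hx⟩
          push_cast at hx
          have : j = k := by omega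
          subst this
          exact hd hdj
        have hf : PySem.Set.contains S ((k + 1 : Nat) : Int) = false := by
          cases hcb : PySem.Set.contains S ((k + 1 : Nat) : Int)
          · rfl
          · exact absurd ((PySem.Set.contains_iff S _).mp hcb) hnm
        have hle' : (h :: t)[k]?.getD 0 ≤ t[k]?.getD 0 := by simpa using not_lt.mp hd
        rw [hf]
        simp [hle']
  rw [List.filter_congr hpred]
  rw [show (fun k : Nat => PySem.List.pyGetD (h :: t) ((0 : Int) + (k : Int)) 0)
      = (fun k : Nat => (h :: t).getD k 0) from funext (fun k => by
        rw [show (0 : Int) + (k : Int) = ((k : Nat) : Int) from by ring, PySem.List.pyGetD_natCast])]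
  rw [List.range_succ_eq_map, List.filter_cons, if_pos (by simp)]
  rw [List.map_cons]
  simp only [List.getD_cons_zero]
  rw [List.filter_map, List.map_map]
  simp only [Function.comp_def]
  congr 1
  rw [List.filter_congr (fun k _ => by
    simp : ∀ k ∈ List.range t.length,
      ((decide (Nat.succ k = 0)) || decide ((h :: t).getD (Nat.succ k - 1) 0 ≤ t.getD (Nat.succ k - 1) 0))
      = (decide ((h :: t).getD k 0 ≤ t.getD k 0)))]
  rw [show (fun k : Nat => (h :: t).getD (Nat.succ k) 0) = (fun k : Nat => t.getD k 0) from
    funext (fun k => by simp only [List.getD_cons_succ])]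
  exact pvCore t h

lemma pvAltLoop_nil (s : Int) : pvAltLoop [] s = s := by
  rw [pvAltLoop.eq_def]

lemma pvAltLoop_cons (h : Int) (t : List Int) (s : Int) :
    pvAltLoop (h :: t) s =
      if _hne : (pvKeptFn h t).length = t.length then s
      else pvAltLoop (h :: pvKeptFn h t) (s + 1) := by
  rw [pvAltLoop.eq_def]

lemma pvMain : ∀ (fuel : Nat) (arr : List Int) (steps : Int), arr.length < fuel →
    pvAltLoop arr steps = steps + pvSimulate fuel arr := by
  intro fuel
  induction fuel with
  | zero => intro arr steps h; simp at h
  | succ f ih =>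
    intro arr steps hlen
    match arr with
    | [] =>
      rw [pvAltLoop_nil]
      simp [pvSimulate]
    | h :: t =>
      rw [pvAltLoop_cons, pvKeptFn_eq t h]
      by_cases hsmall : (h :: t).length ≤ 1
      · have ht : t = [] := by
          cases t with
          | nil => rfl
          | cons a b => simp at hsmall
        subst ht
        simp [pvSimulate, pvG]
      · simp only [pvSimulate]
        rw [if_neg hsmall]
        rw [pvToRemove h t]
        by_cases hempty :
            ((List.range t.length).filter (fun k => decide (t.getD k 0 < (h :: t).getD k 0))).map
              (fun k : Nat => 1 + (k : Int)) = []
        · -- no removal: both sides finish this round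
          have hfil : ((List.range t.length).filter (fun k => decide (t.getD k 0 < (h :: t).getD k 0))) = [] :=
            List.map_eq_nil_iff.mp hempty
          have hall : ∀ k, k < t.length → (h :: t).getD k 0 ≤ t.getD k 0 := by
            intro k hk
            have := List.filter_eq_nil_iff.mp hfil k (List.mem_range.mpr hk)
            simpa using this
          have hgt : pvG h t = t := (pvG_eq_self_iff t h).mpr hall
          rw [if_pos hempty]
          rw [dif_pos (show (pvG h t).length = t.length from by rw [hgt])]
          ring
        · -- a removal happens: one more round on h :: pvG h t
          have hne : pvG h t ≠ t := by
            intro hgt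
            apply hempty
            have hfil : ((List.range t.length).filter (fun k => decide (t.getD k 0 < (h :: t).getD k 0))) = [] := by
              apply List.filter_eq_nil_iff.mpr
              intro k hk
              have := (pvG_eq_self_iff t h).mp hgt k (List.mem_range.mp hk)
              simpa using not_lt.mpr this
            rw [hfil]
            rfl
          have hlt : (pvG h t).length < t.length := by
            have hle := (pvG_sublist t h).length_le
            rcases Nat.lt_or_ge (pvG h t).length t.length with h' | h'
            · exact h'
            · exact absurd ((pvG_len_eq_iff t h).mp (by omega)) hne
          have hnelen : ¬ ((pvG h t).length = t.length) := by omega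
          rw [if_neg hempty]
          rw [dif_neg hnelen]
          rw [pvNewArr h t]
          have hlen2 : (h :: pvG h t).length < f := by
            simp only [List.length_cons] at hlen ⊢
            omega
          rw [ih (h :: pvG h t) (steps + 1) hlen2]
          ring

-- ===== VERDICT (by name: the statement is the Claim_ definition above) =====
theorem totalSteps_recursive_spec : Claim_equal_totalSteps_recursive := by
  intro nums _
  unfold Spec_totalSteps_recursive totalSteps_recursive totalSteps_recursive_alt
  rw [pvMain (nums.length + 1) nums 0 (by omega)]
  ring
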